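-- pv_equiv track=rewrite | github.com/Suraj-Yadav/bf-interpreter | test.py | f
-- ===== SOURCE A (Python) =====
-- def f(v0, vn8, vn7, vn9):
--     while v0 != 0:
--         v0 = v0 + -1
--         vn8 = vn8 + 1
--         vn8 += vn7
--         vn9 += vn7
--         vn7 = 0
--         vn7 += vn8
--         vn8 = 0
--     return v0, vn8, vn7, vn9
-- ===== SOURCE B (Python) =====
-- def f(v0, vn8, vn7, vn9):
--     # Closed form: each loop pass sends (vn8, vn7, vn9) to (0, vn8+vn7+1, vn9+vn7),
--     # so after v0 >= 1 passes vn7 = vn8+vn7+v0 and vn9 grows by an arithmetic series.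
--     if v0 == 0:
--         return v0, vn8, vn7, vn9
--     s = vn8 + vn7
--     return 0, 0, s + v0, vn9 + vn7 + (v0 - 1) * s + v0 * (v0 - 1) // 2
-- ===== Notes on version B (the rewrite author's own statement) =====
-- stated objective: faster
-- what changed: Replaces the v0-step while loop with an O(1) closed-form arithmetic-series formula (special-casing v0=0).
import Mathlib
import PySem

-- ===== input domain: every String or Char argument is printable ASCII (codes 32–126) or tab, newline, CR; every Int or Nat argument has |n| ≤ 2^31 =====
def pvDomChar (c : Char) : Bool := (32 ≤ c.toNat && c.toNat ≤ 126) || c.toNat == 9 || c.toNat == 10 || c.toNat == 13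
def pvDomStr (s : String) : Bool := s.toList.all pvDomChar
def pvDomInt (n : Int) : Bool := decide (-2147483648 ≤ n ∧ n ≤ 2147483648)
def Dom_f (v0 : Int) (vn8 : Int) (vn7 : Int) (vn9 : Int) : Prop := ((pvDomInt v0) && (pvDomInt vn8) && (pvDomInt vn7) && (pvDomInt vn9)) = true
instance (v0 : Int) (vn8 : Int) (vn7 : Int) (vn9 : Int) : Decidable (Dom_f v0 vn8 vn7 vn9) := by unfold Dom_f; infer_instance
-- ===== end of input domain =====

-- B replaces the O(v0) while loop with an O(1) closed-form arithmetic-series formula.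

-- ===== PORT A =====
-- A's while loop, step for step; the fuel v0.toNat counts the loop passes (v0 decreases by 1 each pass and the loop exits at 0).
def fLoop : Nat → Int → Int → Int → Int → Int × Int × Int × Int
  | 0, v0, vn8, vn7, vn9 => (v0, vn8, vn7, vn9)
  | n + 1, v0, vn8, vn7, vn9 =>
      let v0' := v0 + (-1)
      let vn8' := vn8 + 1
      let vn8'' := vn8' + vn7
      let vn9' := vn9 + vn7
      let vn7' := (0 : Int)
      let vn7'' := vn7' + vn8''
      let vn8''' := (0 : Int)
      fLoop n v0' vn8''' vn7'' vn9'

def f (v0 : Int) (vn8 : Int) (vn7 : Int) (vn9 : Int) : Int × Int × Int × Int :=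
  fLoop v0.toNat v0 vn8 vn7 vn9

-- ===== PORT B =====
def f_alt (v0 : Int) (vn8 : Int) (vn7 : Int) (vn9 : Int) : Int × Int × Int × Int :=
  if v0 == 0 then (v0, vn8, vn7, vn9)
  else
    let s := vn8 + vn7
    (0, 0, s + v0, vn9 + vn7 + (v0 - 1) * s + PySem.Int.floordiv (v0 * (v0 - 1)) 2)

-- ===== PRECONDITION & SPEC =====
-- A's while loop never terminates for v0 < 0 (v0 only decreases), so A returns exactly when v0 ≥ 0.
def Pre_f (v0 : Int) (vn8 : Int) (vn7 : Int) (vn9 : Int) : Prop := 0 ≤ v0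
instance (v0 : Int) (vn8 : Int) (vn7 : Int) (vn9 : Int) : Decidable (Pre_f v0 vn8 vn7 vn9) := by unfold Pre_f; infer_instance
def pvWitness_f : Int × Int × Int × Int := (3, 1, 2, 5)

def Spec_f (v0 : Int) (vn8 : Int) (vn7 : Int) (vn9 : Int) (out : Int × Int × Int × Int) : Prop := out = f_alt v0 vn8 vn7 vn9
instance (v0 : Int) (vn8 : Int) (vn7 : Int) (vn9 : Int) (out : Int × Int × Int × Int) : Decidable (Spec_f v0 vn8 vn7 vn9 out) := by unfold Spec_f; infer_instance

-- ===== CLAIM (what is proved, stated in full; the proofs are below) =====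
def Claim_equal_f : Prop := ∀ (v0 : Int) (vn8 : Int) (vn7 : Int) (vn9 : Int), Dom_f v0 vn8 vn7 vn9 → Pre_f v0 vn8 vn7 vn9 → Spec_f v0 vn8 vn7 vn9 (f v0 vn8 vn7 vn9)

-- ===== LEMMAS AND PROOFS =====

-- triangular-number step: (n+2)*(n+1)/2 = (n+1)*n/2 + (n+1)  (Nat division, exact)
lemma tri_succ (n : Nat) : (n + 2) * (n + 1) / 2 = (n + 1) * n / 2 + (n + 1) := by
  have h : (n + 2) * (n + 1) = (n + 1) * n + (n + 1) * 2 := by ring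
  rw [h, Nat.add_mul_div_right _ _ (by norm_num : 0 < 2)]

-- closed form of A's loop after n+1 passes
lemma fLoop_closed (n : Nat) : ∀ (v vn8 vn7 vn9 : Int),
    fLoop (n + 1) v vn8 vn7 vn9 =
      (v - (n + 1), 0, vn8 + vn7 + (n + 1),
        vn9 + vn7 + (n : Int) * (vn8 + vn7) + (((n + 1) * n / 2 : Nat) : Int)) := by
  induction n with
  | zero =>
    intro v vn8 vn7 vn9
    simp [fLoop]
    constructor
    · ring
    · ring
  | succ m ih =>
    intro v vn8 vn7 vn9
    show fLoop (m + 1) (v + (-1)) 0 (0 + (vn8 + 1 + vn7)) (vn9 + vn7) = _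
    rw [ih]
    have htri : (((m + 2) * (m + 1) / 2 : Nat) : Int)
        = (((m + 1) * m / 2 : Nat) : Int) + (m + 1) := by
      rw [tri_succ]; push_cast; ring
    refine Prod.ext (by push_cast; ring) (Prod.ext rfl (Prod.ext (by push_cast; ring) ?_))
    simp only [htri]
    push_cast
    ring

lemma floordiv_tri (n : Nat) :
    PySem.Int.floordiv (((n : Int) + 1) * ((n : Int) + 1 - 1)) 2 = (((n + 1) * n / 2 : Nat) : Int) := by
  have h : ((n : Int) + 1) * ((n : Int) + 1 - 1) = (((n + 1) * n : Nat) : Int) := by push_cast; ring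
  rw [h]
  exact_mod_cast PySem.Int.floordiv_natCast ((n + 1) * n) 2

-- ===== VERDICT (by name: the statement is the Claim_ definition above) =====
theorem f_spec : Claim_equal_f := by
  intro v0 vn8 vn7 vn9 _ hpre
  unfold Spec_f f f_alt
  rcases Int.le_iff_lt_or_eq.mp hpre with hpos | hzero
  · obtain ⟨n, hn⟩ : ∃ n : Nat, v0 = (n : Int) + 1 := by
      refine ⟨(v0 - 1).toNat, ?_⟩; omega
    have htoNat : v0.toNat = n + 1 := by omega
    subst hn
    rw [htoNat, fLoop_closed]
    have hne : ((n : Int) + 1 == 0) = false := by simp; omega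
    simp only [hne]
    refine Prod.ext (by push_cast; ring) (Prod.ext rfl (Prod.ext (by push_cast; ring) ?_))
    simp only [floordiv_tri]
    push_cast
    ring
  · rw [← hzero]
    simp [fLoop]
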